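-- pv_equiv track=rewrite | github.com/Sieboldianus/TagMaps | tagmaps/classes/utils.py | filter_tags
-- ===== SOURCE A (Python) =====
-- from typing import Dict, Iterable, List, Optional, Set, Tuple, Union
--
-- def filter_tags(taglist: Set[str],
--                 sort_out_always_set: Set[str],
--                 sort_out_always_instr_set: Set[str],
--                 select_tags_set: Set[str] = None
--                 ) -> Tuple[Set[str], int, int]:
--     """Filter list of tags based on two stoplists
--
--     - also removes numeric items and duplicates
--     - extracts only tags with len(s) > 1
--     - optionally filters list according to positive selection list
--
--     Args:
--         taglist (Iterable[str]): List/Set of input tags to filter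
--         sort_out_always_set (Set[str]): Filter complete match
--         sort_out_always_instr_set (Set[str]): Filter partial match
--         select_tags_set (Set[str]): Positive filter list
--
--     Returns:
--         Tuple[Set[str], int, int]: Filtered list,
--                                    length of list and
--                                    skipped number of items
--     """
--
--     count_tags = 0
--     count_skipped = 0
--
--     tags_filtered = set()
--     for tag in taglist:
--         count_tags += 1
--         if select_tags_set is not None:
--             # positive list available,
--             # return only selected items
--             if tag in select_tags_set:
--                 tags_filtered.add(tag)
--             else:
--                 count_skipped += 1
--         else:
--             # exclude numbers and those tags
--             # that are in sort_out_always_set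
--             # or sort_out_always_instr_set
--             if (len(tag) == 1 or tag == '""'
--                     or tag.isdigit()
--                     or tag in sort_out_always_set):
--                 count_skipped += 1
--                 continue
--             for in_str_partial in sort_out_always_instr_set:
--                 if in_str_partial in tag:
--                     count_skipped += 1
--                     break
--             else:
--                 # final else Clause on loop statement
--                 tags_filtered.add(tag)
--     return (tags_filtered,
--             count_tags, count_skipped)
-- ===== SOURCE B (Python) =====
-- def filter_tags(taglist, sort_out_always_set, sort_out_always_instr_set,
--                 select_tags_set=None):
--     """Substring-index rewrite: hash the stop sets once; the partial-match
--     test enumerates each tag's substrings and looks them up in the hashed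
--     pattern set, instead of scanning every pattern over every tag."""
--     tags = list(taglist)
--     total = len(tags)
--     if select_tags_set is not None:
--         sel = set(select_tags_set)
--         kept = [t for t in tags if t in sel]
--     else:
--         exact = set(sort_out_always_set) | {'""'}
--         instr = set(sort_out_always_instr_set)
--         kept = [t for t in tags
--                 if not (len(t) == 1 or t.isdigit() or t in exact)
--                 and not any(t[i:j] in instr
--                             for i in range(len(t) + 1)
--                             for j in range(i, len(t) + 1))]
--     return set(kept), total, total - len(kept)
-- ===== Notes on version B (the rewrite author's own statement) =====
-- stated objective: alternative
-- what changed: A scans every partial-match pattern over every tag (for-else with break); B builds hash sets of the stoplists once and decides the partial match by enumerating each tag's substrings and looking them up in the pattern set, with the counts derived arithmetically from one kept list instead of incrementally.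
import Mathlib
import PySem

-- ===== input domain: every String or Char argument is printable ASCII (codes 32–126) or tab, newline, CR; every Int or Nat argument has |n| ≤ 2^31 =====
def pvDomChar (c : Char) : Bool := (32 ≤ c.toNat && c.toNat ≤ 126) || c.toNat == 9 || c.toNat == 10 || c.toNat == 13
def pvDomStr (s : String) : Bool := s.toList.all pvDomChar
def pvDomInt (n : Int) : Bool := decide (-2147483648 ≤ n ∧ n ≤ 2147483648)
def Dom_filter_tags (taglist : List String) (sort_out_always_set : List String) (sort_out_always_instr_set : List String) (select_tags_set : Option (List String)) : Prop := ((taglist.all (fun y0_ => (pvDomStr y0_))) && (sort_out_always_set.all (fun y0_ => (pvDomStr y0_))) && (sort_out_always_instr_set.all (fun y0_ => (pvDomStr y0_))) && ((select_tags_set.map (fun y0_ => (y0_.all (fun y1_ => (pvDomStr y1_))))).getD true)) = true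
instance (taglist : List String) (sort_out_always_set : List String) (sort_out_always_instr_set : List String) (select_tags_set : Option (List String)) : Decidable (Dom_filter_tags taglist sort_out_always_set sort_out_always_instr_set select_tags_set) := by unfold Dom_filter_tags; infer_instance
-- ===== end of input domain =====

-- ===== PORT A =====
-- File: B hashes the stoplists once and decides the partial match by looking up each tag's
-- substrings in the pattern set (no per-pattern scan); counts are derived from one kept list.
-- Port of A: one fold over taglist carrying (tags_filtered, count_tags, count_skipped),
-- with the inner for/break/else over sort_out_always_instr_set as an ordered first-match scan.
def filter_tags_step (sort_out_always_set : List String) (sort_out_always_instr_set : List String) (select_tags_set : Option (List String)) (st : List String × Int × Int) (tag : String) : List String × Int × Int :=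
  let tags_filtered := st.1
  let count_tags := st.2.1 + 1
  let count_skipped := st.2.2
  match select_tags_set with
  | some sel =>
      if sel.contains tag then (PySem.Set.add tags_filtered tag, count_tags, count_skipped)
      else (tags_filtered, count_tags, count_skipped + 1)
  | none =>
      if PySem.Str.len tag == 1 || tag == "\"\"" || PySem.Str.strIsdigit tag
          || sort_out_always_set.contains tag then
        (tags_filtered, count_tags, count_skipped + 1)
      else if sort_out_always_instr_set.any (fun p => PySem.Str.isIn p tag) then
        -- for … break: the scan stops at the first partial match
        (tags_filtered, count_tags, count_skipped + 1)
      else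
        (PySem.Set.add tags_filtered tag, count_tags, count_skipped)

def filter_tags (taglist : List String) (sort_out_always_set : List String) (sort_out_always_instr_set : List String) (select_tags_set : Option (List String)) : List String × Int × Int :=
  taglist.foldl (filter_tags_step sort_out_always_set sort_out_always_instr_set select_tags_set) (PySem.Set.empty, 0, 0)

-- ===== PORT B =====
-- Port of B: hashed stop sets; partial match = any substring t[i:j] of the tag lies in instr.
def instr_hit (instr : PySem.Set String) (t : String) : Bool :=
  (PySem.List.pyRange 0 (PySem.Str.len t + 1) 1).any fun i =>
    (PySem.List.pyRange i (PySem.Str.len t + 1) 1).any fun j =>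
      PySem.Set.contains instr (PySem.Str.slice t (some i) (some j))

def keep_alt (exact : PySem.Set String) (instr : PySem.Set String) (t : String) : Bool :=
  !(PySem.Str.len t == 1 || PySem.Str.strIsdigit t || PySem.Set.contains exact t)
    && !instr_hit instr t

def filter_tags_alt (taglist : List String) (sort_out_always_set : List String) (sort_out_always_instr_set : List String) (select_tags_set : Option (List String)) : List String × Int × Int :=
  let total : Int := taglist.length
  let kept : List String :=
    match select_tags_set with
    | some s =>
        let selSet := PySem.Set.ofList s
        taglist.filter (fun t => PySem.Set.contains selSet t)
    | none =>
        let exact := PySem.Set.add (PySem.Set.ofList sort_out_always_set) "\"\""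
        let instr := PySem.Set.ofList sort_out_always_instr_set
        taglist.filter (keep_alt exact instr)
  (PySem.Set.ofList kept, total, total - (kept.length : Int))

-- ===== PRECONDITION & SPEC =====
def Spec_filter_tags (taglist : List String) (sort_out_always_set : List String) (sort_out_always_instr_set : List String) (select_tags_set : Option (List String)) (out : List String × Int × Int) : Prop := out = filter_tags_alt taglist sort_out_always_set sort_out_always_instr_set select_tags_set
instance (taglist : List String) (sort_out_always_set : List String) (sort_out_always_instr_set : List String) (select_tags_set : Option (List String)) (out : List String × Int × Int) : Decidable (Spec_filter_tags taglist sort_out_always_set sort_out_always_instr_set select_tags_set out) := by unfold Spec_filter_tags; infer_instance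

-- ===== CLAIM (what is proved, stated in full; the proofs are below) =====
def Claim_equal_filter_tags : Prop := ∀ (taglist : List String) (sort_out_always_set : List String) (sort_out_always_instr_set : List String) (select_tags_set : Option (List String)), Dom_filter_tags taglist sort_out_always_set sort_out_always_instr_set select_tags_set → Spec_filter_tags taglist sort_out_always_set sort_out_always_instr_set select_tags_set (filter_tags taglist sort_out_always_set sort_out_always_instr_set select_tags_set)

-- ===== LEMMAS AND PROOFS =====
-- A's per-tag decision as a pure predicate (A-side characterisation).
def keep_tag (sos : List String) (sois : List String) (sel : Option (List String)) (tag : String) : Bool :=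
  match sel with
  | some s => s.contains tag
  | none =>
      PySem.Str.len tag != 1 && tag != "\"\"" && !PySem.Str.strIsdigit tag
        && !sos.contains tag
        && !sois.any (fun p => PySem.Str.isIn p tag)

lemma step_eq_keep (sos sois : List String) (sel : Option (List String)) (st : List String × Int × Int) (tag : String) :
    filter_tags_step sos sois sel st tag =
      if keep_tag sos sois sel tag then (PySem.Set.add st.1 tag, st.2.1 + 1, st.2.2)
      else (st.1, st.2.1 + 1, st.2.2 + 1) := by
  unfold filter_tags_step keep_tag
  cases sel with
  | some sel => by_cases h : sel.contains tag <;> simp [*]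
  | none =>
      by_cases h1 : (PySem.Str.len tag == 1 || tag == "\"\"" || PySem.Str.strIsdigit tag
          || sos.contains tag) = true <;>
        by_cases h2 : (sois.any (fun p => PySem.Str.isIn p tag)) = true <;>
        simp_all; (intro hA hB hC; rcases h1 with ((h | h) | h) | h <;> simp_all)

lemma foldl_step_eq (sos sois : List String) (sel : Option (List String)) (l : List String) (tf : List String) (ct cs : Int) :
    l.foldl (filter_tags_step sos sois sel) (tf, ct, cs) =
      ((l.filter (keep_tag sos sois sel)).foldl PySem.Set.add tf,
        ct + (l.length : Int),
        cs + ((l.length : Int) - (l.countP (keep_tag sos sois sel) : Nat))) := by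
  induction l generalizing tf ct cs with
  | nil => simp
  | cons a l ih =>
      rw [List.foldl_cons, step_eq_keep]
      by_cases h : keep_tag sos sois sel a = true
      · rw [if_pos h, ih]
        simp only [List.filter_cons, h, if_pos, List.foldl_cons, List.countP_cons,
          List.length_cons, Prod.mk.injEq]
        refine ⟨by simp, by push_cast; ring, by push_cast; ring⟩
      · rw [if_neg h, ih]
        simp only [List.filter_cons, h, List.countP_cons,
          List.length_cons, Prod.mk.injEq]
        refine ⟨by simp, by push_cast; ring, by push_cast; ring⟩

-- The substring-index test equals A's per-pattern scan.
lemma instr_hit_eq (sois : List String) (t : String) :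
    instr_hit (PySem.Set.ofList sois) t = sois.any (fun p => PySem.Str.isIn p t) := by
  apply Bool.eq_iff_iff.mpr
  simp only [instr_hit, List.any_eq_true, PySem.List.mem_pyRange_one,
    PySem.Set.contains, List.contains_iff_mem, PySem.Set.mem_ofList,
    PySem.Str.isIn_iff_infix]
  constructor
  · rintro ⟨i, ⟨hi0, _⟩, j, ⟨hij, _⟩, hmem⟩
    refine ⟨PySem.Str.slice t (some i) (some j), hmem, ?_⟩
    rw [PySem.Str.toList_slice, PySem.Chars.slice_eq_listSlice,
      PySem.List.slice_toNat _ hi0 (le_trans hi0 hij)]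
    exact (List.take_prefix _ _).isInfix.trans (List.drop_suffix _ _).isInfix
  · rintro ⟨p, hp, pre, suf, h⟩
    have hlen : pre.length + p.toList.length ≤ t.toList.length := by
      rw [← h]; simp
    simp only [String.length_toList] at hlen
    refine ⟨(pre.length : Int), ⟨by positivity, ?_⟩,
      ((pre.length + p.toList.length : Nat) : Int), ⟨by push_cast; omega, ?_⟩, ?_⟩
    · simp [PySem.Str.len, String.length_toList]
      omega
    · simp [PySem.Str.len, String.length_toList]
      omega
    · have hps : PySem.Str.slice t (some (pre.length : Int))
          (some ((pre.length + p.toList.length : Nat) : Int)) = p := by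
        apply String.toList_inj.mp
        rw [PySem.Str.toList_slice, PySem.Chars.slice_eq_listSlice,
          PySem.List.slice_natCast, ← h]
        simp
      rw [hps]; exact hp

-- The exact-match test with the merged {'""'} element equals A's two checks.
lemma exact_contains_eq (sos : List String) (t : String) :
    PySem.Set.contains (PySem.Set.add (PySem.Set.ofList sos) "\"\"") t
      = (t == "\"\"" || sos.contains t) := by
  apply Bool.eq_iff_iff.mpr
  simp only [PySem.Set.contains, List.contains_iff_mem, PySem.Set.mem_add,
    PySem.Set.mem_ofList, Bool.or_eq_true, beq_iff_eq]
  tauto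

-- B's keep predicate agrees with A's keep predicate pointwise.
lemma keep_alt_eq (sos sois : List String) (t : String) :
    keep_alt (PySem.Set.add (PySem.Set.ofList sos) "\"\"") (PySem.Set.ofList sois) t
      = keep_tag sos sois none t := by
  unfold keep_alt keep_tag
  rw [instr_hit_eq, exact_contains_eq]
  apply Bool.eq_iff_iff.mpr
  simp only [Bool.and_eq_true, Bool.not_eq_eq_eq_not, Bool.not_true, Bool.or_eq_false_iff,
    beq_eq_false_iff_ne, bne_iff_ne]
  tauto

-- ===== VERDICT (by name: the statement is the Claim_ definition above) =====
theorem filter_tags_spec : Claim_equal_filter_tags := by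
  intro taglist sos sois sel _
  unfold Spec_filter_tags filter_tags
  rw [foldl_step_eq]
  cases sel with
  | some s =>
      unfold filter_tags_alt
      simp only []
      rw [show (fun t => PySem.Set.contains (PySem.Set.ofList s) t) = keep_tag sos sois (some s)
        from funext fun t => by simp [keep_tag, PySem.Set.contains, PySem.Set.mem_ofList]]
      simp [PySem.Set.ofList_eq_foldl, PySem.Set.empty, ← List.countP_eq_length_filter]
  | none =>
      unfold filter_tags_alt
      simp only []
      rw [show keep_alt (PySem.Set.add (PySem.Set.ofList sos) "\"\"") (PySem.Set.ofList sois)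
          = keep_tag sos sois none
        from funext fun t => keep_alt_eq sos sois t]
      simp [PySem.Set.ofList_eq_foldl, PySem.Set.empty, ← List.countP_eq_length_filter]
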